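-- pv_equiv track=rewrite | github.com/Luisfer3100/Python-HM | Proyectos/Ejercicios/Tipos avanzados/Tipos avanzados (funciones).py | mayor_valor
-- ===== SOURCE A (Python) =====
-- def mayor_valor(ordenar):
--     tupla_mayor = []
--     max_valor = 0
--     for n in ordenar:
--         if n[1] > max_valor:
--             tupla_mayor = [n]
--             max_valor = n[1]
--         elif n[1] == max_valor:
--             tupla_mayor.append(n)
--     return tupla_mayor
-- ===== SOURCE B (Python) =====
-- def mayor_valor(ordenar):
--     max_valor = 0
--     for n in ordenar:
--         if n[1] > max_valor:
--             max_valor = n[1]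
--     return [n for n in ordenar if n[1] == max_valor]
-- ===== Notes on version B (the rewrite author's own statement) =====
-- stated objective: simpler
-- what changed: Replaces the single running-max pass that rebuilds/appends to the candidate list on the fly with a compute-then-filter decomposition: first reduce to the maximum value (seeded at 0), then filter the tuples equal to it in one comprehension.
import Mathlib
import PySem

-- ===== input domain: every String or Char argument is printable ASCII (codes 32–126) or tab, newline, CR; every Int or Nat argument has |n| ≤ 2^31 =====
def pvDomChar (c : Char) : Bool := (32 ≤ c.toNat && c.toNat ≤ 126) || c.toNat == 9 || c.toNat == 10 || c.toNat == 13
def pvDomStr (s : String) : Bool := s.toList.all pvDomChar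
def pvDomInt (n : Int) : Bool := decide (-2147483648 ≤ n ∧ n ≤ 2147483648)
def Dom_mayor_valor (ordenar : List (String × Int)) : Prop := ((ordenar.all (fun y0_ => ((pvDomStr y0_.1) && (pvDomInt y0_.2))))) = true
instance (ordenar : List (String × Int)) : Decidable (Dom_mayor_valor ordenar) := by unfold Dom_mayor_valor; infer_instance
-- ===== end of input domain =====

-- B replaces A's single running-max-and-append pass by a simpler compute-then-filter decomposition: reduce to the max value (seeded at 0), then filter the tuples equal to it.


-- ===== PORT A =====
-- for loop with state (tupla_mayor, max_valor), branches in source order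
def mayorStep (st : List (String × Int) × Int) (n : String × Int) : List (String × Int) × Int :=
  if n.2 > st.2 then ([n], n.2)
  else if n.2 = st.2 then (st.1 ++ [n], st.2)
  else st

def mayor_valor (ordenar : List (String × Int)) : List (String × Int) :=
  (ordenar.foldl mayorStep ([], 0)).1

-- ===== PORT B =====
-- B: compute the max (seeded at 0), then filter
def mayor_valor_alt (ordenar : List (String × Int)) : List (String × Int) :=
  let max_valor := ordenar.foldl (fun m n => if n.2 > m then n.2 else m) 0
  ordenar.filter (fun n => n.2 == max_valor)

-- ===== PRECONDITION & SPEC =====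
def Spec_mayor_valor (ordenar : List (String × Int)) (out : List (String × Int)) : Prop := out = mayor_valor_alt ordenar
instance (ordenar : List (String × Int)) (out : List (String × Int)) : Decidable (Spec_mayor_valor ordenar out) := by unfold Spec_mayor_valor; infer_instance

-- ===== CLAIM (what is proved, stated in full; the proofs are below) =====
def Claim_equal_mayor_valor : Prop := ∀ (ordenar : List (String × Int)), Dom_mayor_valor ordenar → Spec_mayor_valor ordenar (mayor_valor ordenar)

-- ===== LEMMAS AND PROOFS =====

-- the max A's loop tracks is B's max reduction
def maxFrom (m : Int) (l : List (String × Int)) : Int :=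
  l.foldl (fun m n => if n.2 > m then n.2 else m) m

theorem maxFrom_ge (m : Int) (l : List (String × Int)) : m ≤ maxFrom m l := by
  induction l generalizing m with
  | nil => simp [maxFrom]
  | cons n t ih =>
    simp only [maxFrom, List.foldl_cons]
    by_cases h : n.2 > m
    · simp only [if_pos h]; exact le_trans (le_of_lt h) (ih n.2)
    · simp only [if_neg h]; exact ih m

theorem maxFrom_cons (m : Int) (n : String × Int) (t : List (String × Int)) :
    maxFrom m (n :: t) = maxFrom (if n.2 > m then n.2 else m) t := rfl

theorem aLoop_eq (l : List (String × Int)) (acc : List (String × Int)) (m : Int) :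
    (l.foldl mayorStep (acc, m)).1 =
      (if maxFrom m l = m then acc else []) ++ l.filter (fun n => n.2 == maxFrom m l) := by
  induction l generalizing acc m with
  | nil => simp [maxFrom]
  | cons n t ih =>
    simp only [List.foldl_cons, mayorStep, maxFrom_cons, List.filter_cons]
    by_cases h1 : n.2 > m
    · simp only [if_pos h1]
      rw [ih]
      have hM : n.2 ≤ maxFrom n.2 t := maxFrom_ge n.2 t
      by_cases h2 : maxFrom n.2 t = n.2
      · have hm : ¬ n.2 = m := ne_of_gt h1
        simp [h2, hm]
      · have hb : ¬ (n.2 == maxFrom n.2 t) = true := by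
          simp only [beq_iff_eq]; exact fun h => h2 h.symm
        have hm : ¬ maxFrom n.2 t = m := fun h =>
          absurd (h ▸ lt_of_lt_of_le h1 hM) (lt_irrefl _)
        simp [h2, hb, hm]
    · simp only [if_neg h1]
      by_cases h2 : n.2 = m
      · simp only [if_pos h2]
        rw [ih]
        by_cases h3 : maxFrom m t = m
        · simp [h3, h2]
        · have hb : ¬ (n.2 == maxFrom m t) = true := by
            simp only [beq_iff_eq, h2]; exact fun h => h3 h.symm
          simp [h3, hb]
      · simp only [if_neg h2]
        rw [ih]
        have hlt : n.2 < m := lt_of_le_of_ne (not_lt.mp h1) h2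
        have hM : m ≤ maxFrom m t := maxFrom_ge m t
        have hb : ¬ (n.2 == maxFrom m t) = true := by
          simp only [beq_iff_eq]
          exact fun h => absurd (h ▸ lt_of_lt_of_le hlt hM) (lt_irrefl _)
        simp [hb]

-- ===== VERDICT =====
theorem mayor_valor_spec : Claim_equal_mayor_valor := by
  intro ordenar _
  unfold Spec_mayor_valor mayor_valor mayor_valor_alt
  rw [aLoop_eq]
  simp [maxFrom]
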